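-- pv_equiv track=rewrite | github.com/CSC-101/lab5-geethitarra | lab5.py | largest_between
-- ===== SOURCE A (Python) =====
-- def largest_between(values:list[int], lower:int, upper:int):
--     if lower > upper:
--         return None
--     lower = max(0,lower)
--     upper = min(len(values)-1,upper)
--     index = lower
--
--     for i in range(lower, upper+1):
--         if values[i] > values[lower]:
--             index =  i
--     return index
-- ===== SOURCE B (Python) =====
-- def largest_between(values: list[int], lower: int, upper: int):
--     if lower > upper:
--         return None
--     lo = max(0, lower)
--     hi = min(len(values) - 1, upper)
--     i = hi
--     while i >= lo:
--         if values[i] > values[lo]: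
--             return i
--         i -= 1
--     return lo
-- ===== Notes on version B (the rewrite author's own statement) =====
-- stated objective: alternative
-- what changed: Replaces the forward range-loop that keeps overwriting an accumulator with a backward while-loop that returns immediately at the first index from the right with values[i] > values[lo] (falling through to lo), which is exactly the forward loop's final overwrite.
import Mathlib
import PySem

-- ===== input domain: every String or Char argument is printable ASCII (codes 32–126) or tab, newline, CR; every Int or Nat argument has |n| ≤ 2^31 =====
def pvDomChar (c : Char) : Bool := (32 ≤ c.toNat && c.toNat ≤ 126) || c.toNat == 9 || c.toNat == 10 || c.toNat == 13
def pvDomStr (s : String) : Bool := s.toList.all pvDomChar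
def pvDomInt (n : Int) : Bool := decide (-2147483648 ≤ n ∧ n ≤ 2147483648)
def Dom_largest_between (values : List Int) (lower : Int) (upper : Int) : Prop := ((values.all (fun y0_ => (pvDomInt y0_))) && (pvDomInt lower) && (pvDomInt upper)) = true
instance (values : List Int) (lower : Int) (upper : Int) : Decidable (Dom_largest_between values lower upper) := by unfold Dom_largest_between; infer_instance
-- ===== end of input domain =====

-- B replaces A's forward overwrite-accumulator range loop by a backward early-return while loop (same O(n) cost, different control structure).
-- ===== PORT A =====
def largest_between (values : List Int) (lower : Int) (upper : Int) : Option Int :=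
  if lower > upper then none
  else
    let lower := max 0 lower
    let upper := min ((values.length : Int) - 1) upper
    some ((PySem.List.pyRange lower (upper + 1) 1).foldl
      (fun index i => if PySem.List.pyGetD values i 0 > PySem.List.pyGetD values lower 0 then i else index) lower)

-- ===== PORT B =====
-- the `while i >= lo: … i -= 1` loop of Source B, as a recursion on the decreasing counter i
def lastHitFrom (values : List Int) (lo : Int) (i : Int) : Int :=
  if i ≥ lo then
    if PySem.List.pyGetD values i 0 > PySem.List.pyGetD values lo 0 then i
    else lastHitFrom values lo (i - 1)
  else lo
termination_by (i + 1 - lo).toNat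
decreasing_by omega

def largest_between_alt (values : List Int) (lower : Int) (upper : Int) : Option Int :=
  if lower > upper then none
  else
    let lo := max 0 lower
    let hi := min ((values.length : Int) - 1) upper
    some (lastHitFrom values lo hi)

-- ===== PRECONDITION & SPEC =====
def Spec_largest_between (values : List Int) (lower : Int) (upper : Int) (out : Option Int) : Prop := out = largest_between_alt values lower upper
instance (values : List Int) (lower : Int) (upper : Int) (out : Option Int) : Decidable (Spec_largest_between values lower upper out) := by unfold Spec_largest_between; infer_instance

-- ===== CLAIM (what is proved, stated in full; the proofs are below) =====
def Claim_equal_largest_between : Prop := ∀ (values : List Int) (lower : Int) (upper : Int), Dom_largest_between values lower upper → Spec_largest_between values lower upper (largest_between values lower upper)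

-- ===== LEMMAS AND PROOFS =====

-- A's forward overwrite fold over [lo, hi] equals B's backward early-return search from hi.
theorem fold_eq_lastHitFrom (values : List Int) (lo : Int) :
    ∀ (n : Nat) (hi : Int), (hi + 1 - lo).toNat = n →
      (PySem.List.pyRange lo (hi + 1) 1).foldl
        (fun index i => if PySem.List.pyGetD values i 0 > PySem.List.pyGetD values lo 0 then i else index) lo
        = lastHitFrom values lo hi := by
  intro n
  induction n with
  | zero =>
    intro hi h
    have hlt : ¬ hi ≥ lo := by omega
    rw [PySem.List.pyRange_one_eq_nil (by omega), lastHitFrom]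
    simp [hlt]
  | succ n ih =>
    intro hi h
    have hle : lo ≤ hi := by omega
    rw [PySem.List.pyRange_one_succ_right hle, List.foldl_append]
    have := ih (hi - 1) (by omega)
    rw [show hi - 1 + 1 = hi by ring] at this
    rw [this]
    conv_rhs => rw [lastHitFrom]
    simp [hle]

-- ===== VERDICT (by name: the statement is the Claim_ definition above) =====
theorem largest_between_spec : Claim_equal_largest_between := by
  unfold Claim_equal_largest_between
  intro values lower upper _
  unfold Spec_largest_between largest_between largest_between_alt
  split
  · rfl
  · exact congrArg some (fold_eq_lastHitFrom values (max 0 lower) _ _ rfl)
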